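-- pv_equiv track=rewrite | github.com/waditu/czsc | czsc/cobra/utils.py | drop_duplicates_by_window
-- ===== SOURCE A (Python) =====
-- from typing import List, Union
--
-- def drop_duplicates_by_window(seq: List[Union[str, int, float]],
--                               default_value: [str, int, float] = None,
--                               window_size: int = 5) -> List[Union[str, int, float]]:
--     """从左到右按窗口进行去重，并使用 default_value 进行填充
--
--     :param seq: 输入序列
--     :param default_value: 重复位置的默认填充值
--     :param window_size: 窗口大小
--     :return: 去重后的序列
--     """
--     for i in range(len(seq)):
--         if i < window_size:
--             left = seq[: i]
--         else:
--             left = seq[i-window_size+1: i]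
--
--         if seq[i] in left:
--             seq[i] = default_value
--     return seq
-- ===== SOURCE B (Python) =====
-- def drop_duplicates_by_window(seq, default_value=None, window_size=5):
--     """Single pass with a sliding multiset (dict of counts) of the last
--     window_size-1 emitted values: O(n) instead of O(n*w).
--     Note: A mutates seq in place; B leaves seq untouched and returns a new list."""
--     k = window_size - 1
--     if k < 0:
--         k = 0
--     out = []
--     counts = {}
--     for i, x in enumerate(seq):
--         cur = default_value if counts.get(x, 0) > 0 else x
--         out.append(cur)
--         counts[cur] = counts.get(cur, 0) + 1
--         if i >= k:
--             old = out[i - k]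
--             counts[old] = counts[old] - 1
--     return out
-- ===== Notes on version B (the rewrite author's own statement) =====
-- stated objective: faster
-- what changed: Replaces the per-index window slicing and linear 'in' scan with a single pass that maintains a sliding multiset (dict of counts) of the last window_size-1 emitted values, giving O(1) duplicate checks.
import Mathlib
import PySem

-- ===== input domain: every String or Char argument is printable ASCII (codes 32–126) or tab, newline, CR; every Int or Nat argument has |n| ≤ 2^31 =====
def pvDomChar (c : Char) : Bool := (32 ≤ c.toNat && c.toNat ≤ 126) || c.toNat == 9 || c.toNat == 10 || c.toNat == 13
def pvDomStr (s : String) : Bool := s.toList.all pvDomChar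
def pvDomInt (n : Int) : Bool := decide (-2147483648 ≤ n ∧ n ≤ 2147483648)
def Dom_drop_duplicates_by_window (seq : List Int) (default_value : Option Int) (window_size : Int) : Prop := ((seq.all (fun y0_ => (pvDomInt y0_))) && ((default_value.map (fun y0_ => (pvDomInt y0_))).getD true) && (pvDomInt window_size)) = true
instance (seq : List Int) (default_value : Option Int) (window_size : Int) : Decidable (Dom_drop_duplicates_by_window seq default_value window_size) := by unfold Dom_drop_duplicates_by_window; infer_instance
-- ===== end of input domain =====

-- B replaces A's per-index window slice + linear `in` scan with one pass keeping a sliding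
-- multiset (dict of counts) of the last window_size-1 emitted values (objective: faster).
-- A mutates seq in place; B does not — the equivalence proved here is about the return value.

-- ===== PORT A =====
-- literal port of A: for i in range(len(seq)): left = slice; if seq[i] in left: seq[i] = default_value
def drop_duplicates_by_window (seq : List Int) (default_value : Option Int) (window_size : Int) : List (Option Int) :=
  (PySem.List.pyRange 0 (PySem.List.len seq) 1).foldl
    (fun s i =>
      if PySem.List.pyGetD s i none ∈
          (if i < window_size then PySem.List.slice s none (some i)
           else PySem.List.slice s (some (i - window_size + 1)) (some i))
      then PySem.List.pySetD s i default_value else s)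
    (seq.map some)

-- ===== PORT B =====
-- loop of Source B: out/counts accumulators, i the enumerate index (counts[old] always present, so getD is exact)
def ddbwLoop (default_value : Option Int) (k : Int) :
    List Int → Int → List (Option Int) → PySem.Dict (Option Int) Int → List (Option Int)
  | [], _, out, _ => out
  | x :: rest, i, out, counts =>
    let cur := if counts.getD (some x) 0 > 0 then default_value else some x
    let out' := out ++ [cur]
    let counts' := counts.insert cur (counts.getD cur 0 + 1)
    let counts'' :=
      if k ≤ i then
        let old := PySem.List.pyGetD out' (i - k) none
        counts'.insert old (counts'.getD old 0 - 1)
      else counts'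
    ddbwLoop default_value k rest (i + 1) out' counts''

def drop_duplicates_by_window_alt (seq : List Int) (default_value : Option Int) (window_size : Int) : List (Option Int) :=
  let k := if window_size - 1 < 0 then 0 else window_size - 1
  ddbwLoop default_value k seq 0 [] PySem.Dict.empty

-- ===== PRECONDITION & SPEC =====
def Spec_drop_duplicates_by_window (seq : List Int) (default_value : Option Int) (window_size : Int) (out : List (Option Int)) : Prop := out = drop_duplicates_by_window_alt seq default_value window_size
instance (seq : List Int) (default_value : Option Int) (window_size : Int) (out : List (Option Int)) : Decidable (Spec_drop_duplicates_by_window seq default_value window_size out) := by unfold Spec_drop_duplicates_by_window; infer_instance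

-- ===== CLAIM (what is proved, stated in full; the proofs are below) =====
def Claim_equal_drop_duplicates_by_window : Prop := ∀ (seq : List Int) (default_value : Option Int) (window_size : Int), Dom_drop_duplicates_by_window seq default_value window_size → Spec_drop_duplicates_by_window seq default_value window_size (drop_duplicates_by_window seq default_value window_size)

-- ===== LEMMAS AND PROOFS =====

-- the window both programs test membership in: the last K already-produced values
def pvWin (K : Nat) (acc : List (Option Int)) : List (Option Int) := acc.drop (acc.length - K)

-- reference recursion both ports are reduced to
def pvRef (dv : Option Int) (K : Nat) : List (Option Int) → List Int → List (Option Int)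
  | acc, [] => acc
  | acc, x :: xs => pvRef dv K (acc ++ [if some x ∈ pvWin K acc then dv else some x]) xs

lemma set_append_cons (acc t : List (Option Int)) (y v : Option Int) :
    (acc ++ y :: t).set acc.length v = acc ++ v :: t := by
  induction acc with
  | nil => rfl
  | cons a l ih => simp [ih]

lemma pv_left_eq_win (acc t : List (Option Int)) (w : Int) :
    (if ((acc.length:Int)) < w then PySem.List.slice (acc ++ t) none (some (acc.length:Int))
     else PySem.List.slice (acc ++ t) (some ((acc.length:Int) - w + 1)) (some (acc.length:Int)))
    = pvWin (w - 1).toNat acc := by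
  by_cases h : ((acc.length:Int)) < w
  · rw [if_pos h, PySem.List.slice_to_natCast, List.take_left, pvWin,
      show acc.length - (w-1).toNat = 0 by omega, List.drop_zero]
  · rw [if_neg h, PySem.List.slice_toNat (acc ++ t) (by omega) (by omega)]
    by_cases hw : 1 ≤ w
    · rw [show ((acc.length:Int)).toNat - ((acc.length:Int) - w + 1).toNat = (w-1).toNat by omega,
        show ((acc.length:Int) - w + 1).toNat = acc.length - (w-1).toNat by omega,
        List.drop_append_of_le_length (by omega),
        List.take_append_of_le_length (by rw [List.length_drop]; omega),
        List.take_of_length_le (by rw [List.length_drop]; omega), pvWin]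
    · rw [show ((acc.length:Int)).toNat - ((acc.length:Int) - w + 1).toNat = 0 by omega,
        List.take_zero, pvWin, show acc.length - (w-1).toNat = acc.length by omega,
        List.drop_length]

lemma A_fold (dv : Option Int) (w : Int) (rest : List Int) :
    ∀ acc : List (Option Int),
    (PySem.List.pyRange (acc.length) ((acc.length : Int) + rest.length) 1).foldl
      (fun s i =>
        if PySem.List.pyGetD s i none ∈
            (if i < w then PySem.List.slice s none (some i)
             else PySem.List.slice s (some (i - w + 1)) (some i))
        then PySem.List.pySetD s i dv else s)
      (acc ++ rest.map some)
    = pvRef dv (w - 1).toNat acc rest := by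
  induction rest with
  | nil =>
    intro acc
    rw [PySem.List.pyRange_one_eq_nil (by simp)]
    simp [pvRef]
  | cons x xs ih =>
    intro acc
    rw [PySem.List.pyRange_one_cons (by simp only [List.length_cons]; push_cast; omega)]
    rw [List.foldl_cons]
    have hget : PySem.List.pyGetD (acc ++ (x :: xs).map some) ((acc.length:Int)) none = some x := by
      rw [PySem.List.pyGetD_natCast]
      simp [List.getD]
    have hset : PySem.List.pySetD (acc ++ (x :: xs).map some) ((acc.length:Int)) dv
        = acc ++ dv :: xs.map some := by
      rw [PySem.List.pySetD_natCast]
      exact set_append_cons acc (xs.map some) (some x) dv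
    rw [show acc ++ (x :: xs).map some = acc ++ (some x :: xs.map some) from rfl] at hget hset ⊢
    rw [hget, pv_left_eq_win acc (some x :: xs.map some) w, hset]
    have hstep : (if some x ∈ pvWin (w-1).toNat acc then acc ++ dv :: xs.map some
        else acc ++ some x :: xs.map some)
        = (acc ++ [if some x ∈ pvWin (w-1).toNat acc then dv else some x]) ++ xs.map some := by
      by_cases hm : some x ∈ pvWin (w-1).toNat acc
      · rw [if_pos hm, if_pos hm]; simp
      · rw [if_neg hm, if_neg hm]; simp
    rw [hstep]
    have h1 : ((acc.length:Int) + 1) = (((acc ++ [if some x ∈ pvWin (w-1).toNat acc then dv else some x]).length : Nat) : Int) := by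
      simp
    have h2 : ((acc.length:Int) + ((x :: xs).length:Int)) = (((acc ++ [if some x ∈ pvWin (w-1).toNat acc then dv else some x]).length : Int) + (xs.length:Int)) := by
      simp; omega
    rw [h1, h2, ih]
    rfl

lemma B_loop (dv : Option Int) (K : Nat) (rest : List Int) :
    ∀ (acc : List (Option Int)) (counts : PySem.Dict (Option Int) Int),
    (∀ y, counts.getD y 0 = ((pvWin K acc).count y : Int)) →
    ddbwLoop dv (K : Int) rest (acc.length : Int) acc counts = pvRef dv K acc rest := by
  induction rest with
  | nil => intro acc counts _; rfl
  | cons x xs ih =>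
    intro acc counts hc
    have hif : (if counts.getD (some x) 0 > 0 then dv else some x)
        = (if some x ∈ pvWin K acc then dv else some x) := by
      by_cases hm : some x ∈ pvWin K acc
      · rw [if_pos (by rw [hc]; exact_mod_cast List.count_pos_iff.mpr hm), if_pos hm]
      · rw [if_neg (by rw [hc]; intro h; exact hm (List.count_pos_iff.mp (by exact_mod_cast h))), if_neg hm]
    simp only [ddbwLoop, pvRef]
    rw [hif]
    generalize (if some x ∈ pvWin K acc then dv else some x) = cur at *
    have hlen2 : ((acc.length : Int) + 1) = (((acc ++ [cur]).length : Nat) : Int) := by simp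
    rw [hlen2]
    by_cases hKL : K ≤ acc.length
    · rw [if_pos (by omega)]
      rw [show ((acc.length:Int) - (K:Int)) = ((acc.length - K : Nat) : Int) by omega,
        PySem.List.pyGetD_natCast]
      by_cases hK1 : 1 ≤ K
      · have hlt : acc.length - K < acc.length := by omega
        have hold : (acc ++ [cur]).getD (acc.length - K) none = acc[acc.length - K] := by
          rw [List.getD_append _ _ _ _ hlt, List.getD_eq_getElem _ _ hlt]
        have hwin : pvWin K acc = acc[acc.length - K] :: acc.drop (acc.length - K + 1) := by
          unfold pvWin; exact List.drop_eq_getElem_cons hlt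
        have hwin' : pvWin K (acc ++ [cur]) = acc.drop (acc.length - K + 1) ++ [cur] := by
          unfold pvWin
          rw [List.length_append, show acc.length + [cur].length - K = (acc.length - K) + 1 by simp; omega,
            List.drop_append_of_le_length (by omega)]
        rw [hold]
        apply ih
        intro y
        rw [PySem.Dict.getD_insert, PySem.Dict.getD_insert, PySem.Dict.getD_insert, hwin']
        have hsplit : ∀ z : Option Int, (pvWin K acc).count z
            = (acc.drop (acc.length - K + 1)).count z + (if acc[acc.length - K] = z then 1 else 0) := by
          intro z
          rw [hwin, List.count_cons]
          by_cases hz : acc[acc.length - K] = z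
          · simp [hz]
          · simp [hz]
        have Fz : ∀ z, counts.getD z 0
            = ((acc.drop (acc.length - K + 1)).count z : Int) + (if acc[acc.length - K] = z then 1 else 0) := by
          intro z
          rw [hc z, hsplit z]
          by_cases h : acc[acc.length - K] = z
          · rw [if_pos h, if_pos h]; push_cast; ring
          · rw [if_neg h, if_neg h]; push_cast; ring
        have hcount : ((acc.drop (acc.length - K + 1) ++ [cur]).count y : Int)
            = ((acc.drop (acc.length - K + 1)).count y : Int) + (if y = cur then 1 else 0) := by
          by_cases hyc : y = cur
          · simp [List.count_append, hyc]
          · simp [List.count_append, hyc, Ne.symm hyc]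
        rw [hcount]
        simp only [Fz]
        clear Fz hc hsplit hwin hwin' hold hif hcount ih
        split_ifs <;> simp_all
      · have hK0 : K = 0 := by omega
        subst hK0
        have hold : (acc ++ [cur]).getD (acc.length - 0) none = cur := by
          simp [List.getD]
        have hwa : pvWin 0 acc = [] := by
          unfold pvWin; simp
        have hwa' : pvWin 0 (acc ++ [cur]) = [] := by
          unfold pvWin; simp
        rw [hold]
        apply ih
        intro y
        rw [PySem.Dict.getD_insert, PySem.Dict.getD_insert, PySem.Dict.getD_insert, hwa']
        have hcy := hc y; rw [hwa] at hcy
        have hcc := hc cur; rw [hwa] at hcc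
        by_cases hyc : y = cur
        · rw [if_pos hyc, if_pos rfl, hyc, hcc]; ring
        · rw [if_neg hyc, if_neg hyc, hcy]
    · rw [if_neg (by omega)]
      apply ih
      intro y
      rw [PySem.Dict.getD_insert]
      have hwa : pvWin K acc = acc := by
        unfold pvWin; rw [show acc.length - K = 0 by omega, List.drop_zero]
      have hwa' : pvWin K (acc ++ [cur]) = acc ++ [cur] := by
        unfold pvWin
        rw [List.length_append, show acc.length + [cur].length - K = 0 by simp; omega, List.drop_zero]
      rw [hwa']
      by_cases hy : y = cur
      · rw [if_pos hy, hy, hc cur, hwa]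
        push_cast [List.count_append]
        simp
      · rw [if_neg hy, hc y, hwa]
        have : List.count y [cur] = 0 := by simp [Ne.symm hy]
        push_cast [List.count_append, this]
        simp

lemma A_eq_ref (seq : List Int) (dv : Option Int) (w : Int) :
    drop_duplicates_by_window seq dv w = pvRef dv (w - 1).toNat [] seq := by
  have h := A_fold dv w seq []
  simpa [drop_duplicates_by_window] using h

lemma B_eq_ref (seq : List Int) (dv : Option Int) (w : Int) :
    drop_duplicates_by_window_alt seq dv w = pvRef dv (w - 1).toNat [] seq := by
  have hk : (if w - 1 < 0 then (0:Int) else w - 1) = ((w - 1).toNat : Int) := by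
    split_ifs with h <;> omega
  have h := B_loop dv (w - 1).toNat seq [] PySem.Dict.empty (by
    intro y; simp [pvWin, PySem.Dict.getD_empty])
  simp only [drop_duplicates_by_window_alt]
  rw [hk]; exact h

-- ===== VERDICT (by name: the statement is the Claim_ definition above) =====
theorem drop_duplicates_by_window_spec : Claim_equal_drop_duplicates_by_window := by
  intro seq dv w _
  unfold Spec_drop_duplicates_by_window
  rw [A_eq_ref, B_eq_ref]
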